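-- pv_equiv track=rewrite | github.com/jeongseungdeob-glitch/MoonSlicerCLI | executor/anti_cheat_bypass.py | _should_obfuscate
-- ===== SOURCE A (Python) =====
-- def _should_obfuscate(script_content: str) -> bool:
--     """Determine if script should be obfuscated"""
--     # Check for obvious anti-cheat patterns
--     obvious_patterns = [
--         "getfenv",
--         "setfenv",
--         "debug",
--         "loadstring",
--         "dofile"
--     ]
--
--     script_lower = script_content.lower()
--     for pattern in obvious_patterns:
--         if pattern in script_lower:
--             return True
--
--     return False
-- ===== SOURCE B (Python) =====
-- def _should_obfuscate(script_content: str) -> bool: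
--     """Determine if script should be obfuscated"""
--     s = script_content.lower()
--     patterns = ("getfenv", "setfenv", "debug", "loadstring", "dofile")
--     # single left-to-right pass over positions instead of one full scan per pattern
--     return any(s.startswith(p, i) for i in range(len(s)) for p in patterns)
-- ===== Notes on version B (the rewrite author's own statement) =====
-- stated objective: alternative
-- what changed: Replaces five independent full substring scans (one 'pattern in s' per keyword) with a single left-to-right pass over the positions of the lowered string, testing at each position whether any keyword starts there.
import Mathlib
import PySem

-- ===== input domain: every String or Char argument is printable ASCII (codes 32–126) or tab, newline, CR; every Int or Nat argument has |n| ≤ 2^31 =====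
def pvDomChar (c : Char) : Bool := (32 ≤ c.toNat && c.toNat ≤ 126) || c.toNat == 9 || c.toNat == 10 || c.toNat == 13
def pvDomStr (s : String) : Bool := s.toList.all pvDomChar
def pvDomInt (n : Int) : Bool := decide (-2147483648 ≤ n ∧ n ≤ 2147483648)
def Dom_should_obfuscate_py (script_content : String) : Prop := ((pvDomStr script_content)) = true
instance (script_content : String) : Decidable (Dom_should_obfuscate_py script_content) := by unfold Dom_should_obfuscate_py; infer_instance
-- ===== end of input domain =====

-- B: single pass over positions of the lowered string (any keyword starting at each position) instead of A's five separate full substring scans; return value only, no side effects.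
-- ===== PORT A =====
-- the for-loop with early 'return True' over the literal pattern list
def acLoopA (lower : String) : List String → Bool
  | [] => false
  | p :: ps => if PySem.Str.isIn p lower then true else acLoopA lower ps

def should_obfuscate_py (script_content : String) : Bool :=
  let script_lower := PySem.Str.lower script_content
  acLoopA script_lower ["getfenv", "setfenv", "debug", "loadstring", "dofile"]

-- ===== PORT B =====
def altPats : List (List Char) :=
  ["getfenv".toList, "setfenv".toList, "debug".toList, "loadstring".toList, "dofile".toList]

-- any(s.startswith(p, i) for i in range(len(s)) for p in patterns): one pass over suffixes
def altScan (l : List Char) : Bool :=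
  match l with
  | [] => false
  | c :: rest => altPats.any (fun p => PySem.Chars.startswith (c :: rest) p) || altScan rest

def should_obfuscate_py_alt (script_content : String) : Bool :=
  altScan (PySem.Str.lower script_content).toList

-- ===== PRECONDITION & SPEC =====
def Spec_should_obfuscate_py (script_content : String) (out : Bool) : Prop := out = should_obfuscate_py_alt script_content
instance (script_content : String) (out : Bool) : Decidable (Spec_should_obfuscate_py script_content out) := by unfold Spec_should_obfuscate_py; infer_instance

-- ===== CLAIM (what is proved, stated in full; the proofs are below) =====
def Claim_equal_should_obfuscate_py : Prop := ∀ (script_content : String), Dom_should_obfuscate_py script_content → Spec_should_obfuscate_py script_content (should_obfuscate_py script_content)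

-- ===== LEMMAS AND PROOFS =====

-- B's scan finds a pattern iff some pattern is a prefix of some suffix
lemma altScan_iff (l : List Char) :
    altScan l = true ↔ ∃ p ∈ altPats, ∃ j, p <+: l.drop j := by
  induction l with
  | nil =>
    simp [altScan, altPats]
  | cons c rest ih =>
    rw [altScan]
    simp only [Bool.or_eq_true, List.any_eq_true, PySem.Chars.startswith_iff, ih]
    constructor
    · rintro (⟨p, hp, hpre⟩ | ⟨p, hp, j, hpre⟩)
      · exact ⟨p, hp, 0, by simpa using hpre⟩
      · exact ⟨p, hp, j + 1, by simpa using hpre⟩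
    · rintro ⟨p, hp, j, hpre⟩
      cases j with
      | zero => exact Or.inl ⟨p, hp, by simpa using hpre⟩
      | succ k => exact Or.inr ⟨p, hp, k, by simpa using hpre⟩

-- A's per-pattern loop succeeds iff some pattern is an infix
lemma acLoopA_iff (lower : String) (ps : List String) :
    acLoopA lower ps = true ↔ ∃ p ∈ ps, p.toList <:+: lower.toList := by
  induction ps with
  | nil => simp [acLoopA]
  | cons p rest ih =>
    rw [acLoopA]
    split_ifs with h
    · simp only [true_iff]
      exact ⟨p, List.mem_cons_self .., (PySem.Str.isIn_iff_infix _ _).mp h⟩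
    · rw [ih]
      constructor
      · rintro ⟨q, hq, hinf⟩; exact ⟨q, List.mem_cons_of_mem _ hq, hinf⟩
      · rintro ⟨q, hq, hinf⟩
        rcases List.mem_cons.mp hq with rfl | hq'
        · exact absurd ((PySem.Str.isIn_iff_infix _ _).mpr hinf) (by simpa using h)
        · exact ⟨q, hq', hinf⟩

-- ===== VERDICT (by name: the statement is the Claim_ definition above) =====
theorem should_obfuscate_py_spec : Claim_equal_should_obfuscate_py := by
  intro s _
  unfold Spec_should_obfuscate_py should_obfuscate_py should_obfuscate_py_alt
  rw [Bool.eq_iff_iff, acLoopA_iff, altScan_iff]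
  constructor
  · rintro ⟨p, hp, hinf⟩
    refine ⟨p.toList, ?_, ?_⟩
    · fin_cases hp <;> simp [altPats]
    · exact (PySem.Chars.exists_prefix_drop_iff_isIn _ _).mpr
        ((PySem.Chars.isIn_iff_infix _ _).mpr hinf)
  · rintro ⟨p, hp, hdrop⟩
    have hinf := (PySem.Chars.isIn_iff_infix _ _).mp
      ((PySem.Chars.exists_prefix_drop_iff_isIn _ _).mp hdrop)
    fin_cases hp <;>
      exact ⟨_, by simp, hinf⟩
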